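-- pv_equiv track=rewrite | github.com/chesslogic/supercalc | tools/ingest_wikigg_enemy_anatomy.py | find_matching_template_end
-- ===== SOURCE A (Python) =====
-- def find_matching_template_end(text: str, start_index: int) -> int:
--     depth = 0
--     index = start_index
--     length = len(text)
--
--     while index < length - 1:
--         token = text[index : index + 2]
--         if token == "{{":
--             depth += 1
--             index += 2
--             continue
--         if token == "}}":
--             depth -= 1
--             index += 2
--             if depth == 0:
--                 return index
--             continue
--         index += 1
--
--     return -1
-- ===== SOURCE B (Python) =====
-- def find_matching_template_end(text: str, start_index: int) -> int:
--     depth = 0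
--     index = start_index
--     while True:
--         o = text.find("{{", index)
--         c = text.find("}}", index)
--         if o == -1 and c == -1:
--             return -1
--         if c == -1 or (o != -1 and o < c):
--             depth += 1
--             index = o + 2
--         else:
--             depth -= 1
--             index = c + 2
--             if depth == 0:
--                 return index
-- ===== Notes on version B (the rewrite author's own statement) =====
-- stated objective: faster
-- what changed: Replaces A's per-character scan (slicing a 2-char token at every position) with a search-driven loop that uses str.find to jump directly from one '{{'/'}}' marker to the next, keeping the same depth counter and return contract.
-- outside the precondition, e.g. on find_matching_template_end('ab{{x}}', -3): A returns 7, B returns -1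
import Mathlib
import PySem

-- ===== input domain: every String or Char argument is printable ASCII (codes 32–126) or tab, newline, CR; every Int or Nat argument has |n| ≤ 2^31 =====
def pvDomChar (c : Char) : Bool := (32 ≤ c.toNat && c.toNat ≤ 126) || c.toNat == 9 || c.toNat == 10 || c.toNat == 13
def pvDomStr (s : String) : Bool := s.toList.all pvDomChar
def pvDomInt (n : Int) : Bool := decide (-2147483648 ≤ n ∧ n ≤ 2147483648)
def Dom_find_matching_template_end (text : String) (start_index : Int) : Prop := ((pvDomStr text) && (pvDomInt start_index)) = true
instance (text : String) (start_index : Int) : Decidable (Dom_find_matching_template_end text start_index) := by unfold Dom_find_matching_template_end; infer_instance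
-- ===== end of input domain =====

-- B replaces A's per-character scan with str.find-driven jumps between '{{'/'}}' markers
-- (same depth counter and return contract); equivalence is proved for start_index ≥ 0 and,
-- for negative start_index, on marker-free texts (see Pre_). Both loops are ported with a
-- fuel parameter large enough that it is never exhausted.


-- ===== PORT A =====
-- A's while loop: per-character scan, slicing a 2-char token at each position.
-- The index advances on every iteration, so fuel (length + 1 - start_index).toNat never runs out.
def pvALoop (cs : List Char) (length : Int) (fuel : Nat) (depth : Int) (index : Int) : Int :=
  match fuel with
  | 0 => -1
  | fuel + 1 =>
    if index < length - 1 then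
      let token := PySem.List.slice cs (some index) (some (index + 2))
      if token = ['{', '{'] then
        pvALoop cs length fuel (depth + 1) (index + 2)
      else if token = ['}', '}'] then
        if depth - 1 = 0 then index + 2
        else pvALoop cs length fuel (depth - 1) (index + 2)
      else
        pvALoop cs length fuel depth (index + 1)
    else -1

def find_matching_template_end (text : String) (start_index : Int) : Int :=
  pvALoop text.toList (PySem.Str.len text) ((PySem.Str.len text + 1 - start_index).toNat) 0 start_index

-- ===== PORT B =====
-- B's while loop: jump to the earlier of the next '{{' and the next '}}'.
-- The index strictly increases on every iteration, so the same fuel bound never runs out.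
def pvBLoop (cs : List Char) (fuel : Nat) (depth : Int) (index : Int) : Int :=
  match fuel with
  | 0 => -1
  | fuel + 1 =>
    let o := PySem.Chars.findFrom cs ['{', '{'] index none
    let c := PySem.Chars.findFrom cs ['}', '}'] index none
    if o = -1 ∧ c = -1 then -1
    else if c = -1 ∨ (o ≠ -1 ∧ o < c) then
      pvBLoop cs fuel (depth + 1) (o + 2)
    else
      if depth - 1 = 0 then c + 2
      else pvBLoop cs fuel (depth - 1) (c + 2)

def find_matching_template_end_alt (text : String) (start_index : Int) : Int :=
  pvBLoop text.toList ((PySem.Str.len text + 1 - start_index).toNat) 0 start_index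

-- ===== PRECONDITION & SPEC =====
-- Pre_ excludes a negative start_index when the text contains a '{{' or '}}' marker: there A's
-- negative slicing reads characters near the end of the string while B's forward search starts at
-- a clamped position — both behaviours are accidents of the respective mechanisms on an input the
-- function is never meant to receive (on marker-free texts both sides return -1 and are claimed).
def Pre_find_matching_template_end (text : String) (start_index : Int) : Prop :=
  0 ≤ start_index ∨ (PySem.Str.isIn "{{" text = false ∧ PySem.Str.isIn "}}" text = false)
instance (text : String) (start_index : Int) : Decidable (Pre_find_matching_template_end text start_index) := by unfold Pre_find_matching_template_end; infer_instance

def pvWitness_find_matching_template_end : String × Int := ("{{a}}", 0)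

def Spec_find_matching_template_end (text : String) (start_index : Int) (out : Int) : Prop := out = find_matching_template_end_alt text start_index
instance (text : String) (start_index : Int) (out : Int) : Decidable (Spec_find_matching_template_end text start_index out) := by unfold Spec_find_matching_template_end; infer_instance

-- ===== CLAIM (what is proved, stated in full; the proofs are below) =====
def Claim_equal_find_matching_template_end : Prop := ∀ (text : String) (start_index : Int), Dom_find_matching_template_end text start_index → Pre_find_matching_template_end text start_index → Spec_find_matching_template_end text start_index (find_matching_template_end text start_index)

-- ===== LEMMAS AND PROOFS =====

-- bounds of a successful findFrom: the hit is at or after the start and a full match fits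
theorem pvFindCore (cs sub : List Char) (st : Int) (hst : 0 ≤ st) (hsub : sub ≠ [])
    (hr : PySem.Chars.find (cs.drop st.toNat) sub ≠ -1) :
    0 ≤ st + PySem.Chars.find (cs.drop st.toNat) sub ∧
    (st + PySem.Chars.find (cs.drop st.toNat) sub).toNat + sub.length ≤ cs.length ∧
    sub <+: cs.drop (st + PySem.Chars.find (cs.drop st.toNat) sub).toNat := by
  have hf0 : 0 ≤ PySem.Chars.find (cs.drop st.toNat) sub := by
    have := PySem.Chars.neg_one_le_find (cs.drop st.toNat) sub
    omega
  obtain ⟨hp, -⟩ := PySem.Chars.find_spec hf0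
  rw [List.drop_drop] at hp
  have hlen := hp.length_le
  simp only [List.length_drop] at hlen
  have hpos : 0 < sub.length := List.length_pos_iff.mpr hsub
  have ht : (st + PySem.Chars.find (cs.drop st.toNat) sub).toNat
      = st.toNat + (PySem.Chars.find (cs.drop st.toNat) sub).toNat := by omega
  refine ⟨by omega, ?_, by rw [ht]; exact hp⟩
  rw [ht]; omega

theorem pvFindFrom_facts (cs sub : List Char) (i : Int) (hsub : sub ≠ [])
    (h : PySem.Chars.findFrom cs sub i none ≠ -1) :
    0 ≤ PySem.Chars.findFrom cs sub i none ∧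
    (0 ≤ i → i ≤ PySem.Chars.findFrom cs sub i none) ∧
    (PySem.Chars.findFrom cs sub i none).toNat + sub.length ≤ cs.length ∧
    sub <+: cs.drop (PySem.Chars.findFrom cs sub i none).toNat := by
  unfold PySem.Chars.findFrom at h ⊢
  simp only [Int.toNat_natCast, List.take_length] at h ⊢
  split_ifs at h ⊢
  all_goals first
  | (exact absurd rfl h)
  | (have := pvFindCore cs sub 0 (by omega) hsub (by simpa using ‹_›)
     simp only [Int.toNat_zero] at this ⊢
     exact ⟨this.1, by omega, this.2.1, this.2.2⟩)
  | (have := pvFindCore cs sub (i + cs.length) (by omega) hsub (by simpa using ‹_›)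
     exact ⟨this.1, by omega, this.2.1, this.2.2⟩)
  | (have hnle := PySem.Chars.neg_one_le_find (cs.drop i.toNat) sub
     have := pvFindCore cs sub i (by omega) hsub (by simpa using ‹_›)
     exact ⟨this.1, by omega, this.2.1, this.2.2⟩)

-- find is 0 when sub sits right at the front
theorem pvFind_zero (l sub : List Char) (hp : sub <+: l) : PySem.Chars.find l sub = 0 := by
  have hf0 : 0 ≤ PySem.Chars.find l sub :=
    (PySem.Chars.find_nonneg_iff _ _).mpr hp.isInfix
  obtain ⟨-, hmin⟩ := PySem.Chars.find_spec hf0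
  by_contra hne
  have hpos : 0 < (PySem.Chars.find l sub).toNat := by omega
  exact hmin 0 hpos (by simpa using hp)

-- peeling one head character off: find shifts by one when sub does not start at the head
theorem pvFind_cons (a : Char) (l sub : List Char) (hnp : ¬ sub <+: a :: l) :
    PySem.Chars.find (a :: l) sub =
      if PySem.Chars.find l sub = -1 then -1
      else 1 + PySem.Chars.find l sub := by
  split_ifs with h1
  · rw [PySem.Chars.find_eq_neg_one_iff] at h1 ⊢
    intro hin
    rcases List.infix_cons_iff.mp hin with h | h
    · exact hnp h
    · exact h1 h
  · have hf0' : 0 ≤ PySem.Chars.find l sub := by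
      have := PySem.Chars.neg_one_le_find l sub
      omega
    obtain ⟨hp', hmin'⟩ := PySem.Chars.find_spec hf0'
    have hin : sub <:+: a :: l :=
      (hp'.isInfix.trans (List.drop_suffix _ l).isInfix).trans (List.suffix_cons a l).isInfix
    have hf0 : 0 ≤ PySem.Chars.find (a :: l) sub := (PySem.Chars.find_nonneg_iff _ _).mpr hin
    obtain ⟨hp, hmin⟩ := PySem.Chars.find_spec hf0
    have hne0 : (PySem.Chars.find (a :: l) sub).toNat ≠ 0 := by
      intro h0
      rw [h0] at hp
      exact hnp (by simpa using hp)
    have hub : ¬ ((PySem.Chars.find l sub).toNat + 1 < (PySem.Chars.find (a :: l) sub).toNat) := by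
      intro hlt
      exact hmin _ hlt (by simpa [List.drop_succ_cons] using hp')
    have hlb : ¬ ((PySem.Chars.find (a :: l) sub).toNat - 1 < (PySem.Chars.find l sub).toNat) := by
      intro hlt
      refine hmin' _ hlt ?_
      have : (PySem.Chars.find (a :: l) sub).toNat = ((PySem.Chars.find (a :: l) sub).toNat - 1) + 1 := by omega
      rw [this, List.drop_succ_cons] at hp
      exact hp
    omega

-- if sub occurs as a prefix right at position i, findFrom returns i
theorem pvFindFrom_self (cs sub : List Char) (i : Int) (h0 : 0 ≤ i)
    (hle : i.toNat ≤ cs.length) (hp : sub <+: cs.drop i.toNat) :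
    PySem.Chars.findFrom cs sub i none = i := by
  have hi : i = ((i.toNat : Nat) : Int) := by omega
  rw [hi, PySem.Chars.findFrom_natCast cs sub i.toNat hle]
  rw [pvFind_zero _ _ hp]
  norm_num

-- stepping past a position with no occurrence does not change the result
theorem pvFindFrom_step (cs sub : List Char) (i : Int) (h0 : 0 ≤ i)
    (hle : i.toNat + 1 ≤ cs.length) (hnp : ¬ sub <+: cs.drop i.toNat) :
    PySem.Chars.findFrom cs sub i none = PySem.Chars.findFrom cs sub (i + 1) none := by
  have hi : i = ((i.toNat : Nat) : Int) := by omega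
  rw [hi, PySem.Chars.findFrom_natCast cs sub i.toNat (by omega)]
  have hi1 : ((i.toNat : Nat) : Int) + 1 = (((i.toNat + 1 : Nat)) : Int) := by push_cast; ring
  rw [hi1, PySem.Chars.findFrom_natCast cs sub (i.toNat + 1) hle]
  obtain ⟨a, l, hdrop⟩ : ∃ a l, cs.drop i.toNat = a :: l := by
    rcases hd : cs.drop i.toNat with _ | ⟨a, l⟩
    · exfalso
      have := congrArg List.length hd
      simp at this
      omega
    · exact ⟨a, l, rfl⟩
  have hdrop1 : cs.drop (i.toNat + 1) = l := by
    rw [← List.drop_drop, hdrop]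
    simp
  rw [hdrop1, hdrop]
  rw [pvFind_cons a l sub (hdrop ▸ hnp)]
  have hfl := PySem.Chars.neg_one_le_find l sub
  split_ifs <;> push_cast <;> omega

-- past the point where a 2-char substring could still fit, findFrom is -1
theorem pvFindFrom_none (cs sub : List Char) (i : Int) (h0 : 0 ≤ i)
    (hsub : sub.length = 2) (hbig : cs.length < i.toNat + 2) :
    PySem.Chars.findFrom cs sub i none = -1 := by
  by_contra h
  have := pvFindFrom_facts cs sub i (by intro he; rw [he] at hsub; simp at hsub) h
  omega

-- the B loop returns -1 when the scan region is exhausted (any fuel)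
theorem pvBLoop_exhausted (cs : List Char) (M : Nat) (i d : Int) (h0 : 0 ≤ i)
    (hbig : cs.length < i.toNat + 2) : pvBLoop cs M d i = -1 := by
  have ho := pvFindFrom_none cs ['{', '{'] i h0 rfl hbig
  have hc := pvFindFrom_none cs ['}', '}'] i h0 rfl hbig
  cases M with
  | zero => rfl
  | succ m =>
    rw [pvBLoop]
    simp [ho, hc]

-- the main loop equivalence, by induction on the combined fuel
theorem pvMain (cs : List Char) : ∀ (K N M : Nat) (i d : Int), N + M ≤ K →
    ((cs.length : Int) + 1 - i).toNat ≤ N → ((cs.length : Int) + 1 - i).toNat ≤ M → 0 ≤ i →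
    pvALoop cs cs.length N d i = pvBLoop cs M d i := by
  intro K
  induction K with
  | zero =>
    intro N M i d hK hN hM h0
    obtain rfl : N = 0 := by omega
    obtain rfl : M = 0 := by omega
    rfl
  | succ K ih =>
    intro N M i d hK hN hM h0
    rcases N with _ | n
    · -- fuel 0 on the A side forces i past the end of the string
      have : cs.length < i.toNat + 2 := by omega
      rw [pvBLoop_exhausted cs M i d h0 this]
      rfl
    · rcases M with _ | m
      · -- fuel 0 on the B side likewise
        have hge : ¬ (i < (cs.length : Int) - 1) := by omega
        rw [pvALoop]
        rw [if_neg hge]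
        rfl
      · by_cases hlt : i < (cs.length : Int) - 1
        · have hk2 : i.toNat + 2 ≤ cs.length := by omega
          have htok : PySem.List.slice cs (some i) (some (i + 2)) = (cs.drop i.toNat).take 2 := by
            rw [PySem.List.slice_toNat cs h0 (by omega)]
            congr 1
            omega
          by_cases hop : (cs.drop i.toNat).take 2 = ['{', '{']
          · -- an open marker sits at i
            have hp : ['{', '{'] <+: cs.drop i.toNat := by
              conv_lhs => rw [← hop]
              exact List.take_prefix 2 _
            have ho := pvFindFrom_self cs ['{', '{'] i h0 (by omega) hp
            have hcl : ¬ ['}', '}'] <+: cs.drop i.toNat := by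
              intro hq
              rw [List.prefix_iff_eq_take] at hq
              simp only [List.length_cons, List.length_nil] at hq
              rw [hop] at hq
              simp at hq
            have hA : pvALoop cs cs.length (n + 1) d i = pvALoop cs cs.length n (d + 1) (i + 2) := by
              rw [pvALoop, if_pos hlt]
              simp only [htok, hop]
              simp
            have hB : pvBLoop cs (m + 1) d i = pvBLoop cs m (d + 1) (i + 2) := by
              rw [pvBLoop]
              simp only [ho]
              by_cases hc1 : PySem.Chars.findFrom cs ['}', '}'] i none = -1
              · rw [hc1]
                rw [if_neg (by intro h; omega)]
                rw [if_pos (Or.inl rfl)]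
              · obtain ⟨hc0, hci, -, hcp⟩ := pvFindFrom_facts cs ['}', '}'] i (by simp) hc1
                have hcne : PySem.Chars.findFrom cs ['}', '}'] i none ≠ i := by
                  intro he
                  rw [he] at hcp
                  exact hcl (by simpa using hcp)
                rw [if_neg (by intro h; omega)]
                rw [if_pos (Or.inr ⟨by omega, by have := hci h0; omega⟩)]
            rw [hA, hB]
            exact ih n m (i + 2) (d + 1) (by omega) (by omega) (by omega) (by omega)
          · by_cases hcl : (cs.drop i.toNat).take 2 = ['}', '}']
            · -- a close marker sits at i
              have hp : ['}', '}'] <+: cs.drop i.toNat := by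
                conv_lhs => rw [← hcl]
                exact List.take_prefix 2 _
              have hc := pvFindFrom_self cs ['}', '}'] i h0 (by omega) hp
              have hno : ¬ ['{', '{'] <+: cs.drop i.toNat := by
                intro hq
                rw [List.prefix_iff_eq_take] at hq
                simp only [List.length_cons, List.length_nil] at hq
                rw [hcl] at hq
                simp at hq
              have hofact : ∀ (_ : PySem.Chars.findFrom cs ['{', '{'] i none ≠ -1),
                  i ≤ PySem.Chars.findFrom cs ['{', '{'] i none ∧
                  PySem.Chars.findFrom cs ['{', '{'] i none ≠ i := by
                intro hne
                obtain ⟨ho0, hoi, -, hoprefix⟩ := pvFindFrom_facts cs ['{', '{'] i (by simp) hne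
                refine ⟨hoi h0, ?_⟩
                intro he
                rw [he] at hoprefix
                exact hno hoprefix
              have hA : pvALoop cs cs.length (n + 1) d i
                  = if d - 1 = 0 then i + 2 else pvALoop cs cs.length n (d - 1) (i + 2) := by
                rw [pvALoop, if_pos hlt]
                simp only [htok, hcl]
                simp
              have hB : pvBLoop cs (m + 1) d i
                  = if d - 1 = 0 then i + 2 else pvBLoop cs m (d - 1) (i + 2) := by
                rw [pvBLoop]
                simp only [hc]
                rw [if_neg (by intro h; omega)]
                rw [if_neg ?_]
                rintro (he | ⟨hne, hlt'⟩)
                · omega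
                · obtain ⟨hle', hne'⟩ := hofact hne
                  omega
              rw [hA, hB]
              split_ifs with hd
              · rfl
              · exact ih n m (i + 2) (d - 1) (by omega) (by omega) (by omega) (by omega)
            · -- no marker at i: step both searches by one position
              have hnpo : ¬ ['{', '{'] <+: cs.drop i.toNat := by
                intro hq
                rw [List.prefix_iff_eq_take] at hq
                exact hop (by simpa using hq.symm)
              have hnpc : ¬ ['}', '}'] <+: cs.drop i.toNat := by
                intro hq
                rw [List.prefix_iff_eq_take] at hq
                exact hcl (by simpa using hq.symm)
              have hso := pvFindFrom_step cs ['{', '{'] i h0 (by omega) hnpo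
              have hsc := pvFindFrom_step cs ['}', '}'] i h0 (by omega) hnpc
              have hA : pvALoop cs cs.length (n + 1) d i = pvALoop cs cs.length n d (i + 1) := by
                rw [pvALoop, if_pos hlt]
                simp only [htok]
                rw [if_neg hop, if_neg hcl]
              have hB : pvBLoop cs (m + 1) d i = pvBLoop cs (m + 1) d (i + 1) := by
                rw [pvBLoop]
                conv_rhs => rw [pvBLoop]
                rw [hso, hsc]
              rw [hA, hB]
              exact ih n (m + 1) (i + 1) d (by omega) (by omega) (by omega) (by omega)
        · have hge : cs.length < i.toNat + 2 := by omega
          rw [pvBLoop_exhausted cs (m + 1) i d h0 hge, pvALoop, if_neg hlt]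

-- any slice of a list is an infix of it
theorem pvSlice_infix {α : Type} (xs : List α) (a? b? : Option Int) :
    PySem.List.slice xs a? b? <:+: xs := by
  unfold PySem.List.slice
  exact ((List.take_prefix _ _).isInfix.trans (List.drop_suffix _ _).isInfix)

-- findFrom is -1 whenever sub occurs nowhere in the string
theorem pvFindFrom_noInfix (cs sub : List Char) (i : Int) (hsub : sub ≠ [])
    (hni : ¬ sub <:+: cs) : PySem.Chars.findFrom cs sub i none = -1 := by
  by_contra h
  obtain ⟨-, -, -, hp⟩ := pvFindFrom_facts cs sub i hsub h
  exact hni (hp.isInfix.trans (List.drop_suffix _ _).isInfix)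

-- on a marker-free text A's scan never fires a branch and falls through to -1
theorem pvALoop_nomark (cs : List Char) (L : Int)
    (hno : ¬ (['{', '{'] : List Char) <:+: cs) (hnc : ¬ (['}', '}'] : List Char) <:+: cs) :
    ∀ (F : Nat) (d i : Int), pvALoop cs L F d i = -1 := by
  intro F
  induction F with
  | zero => intro d i; rfl
  | succ F ihF =>
    intro d i
    rw [pvALoop]
    by_cases hg : i < L - 1
    · rw [if_pos hg]
      have h2 : PySem.List.slice cs (some i) (some (i + 2)) ≠ ['{', '{'] := by
        intro he
        exact hno (he ▸ pvSlice_infix cs (some i) (some (i + 2)))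
      have h3 : PySem.List.slice cs (some i) (some (i + 2)) ≠ ['}', '}'] := by
        intro he
        exact hnc (he ▸ pvSlice_infix cs (some i) (some (i + 2)))
      simp only [if_neg h2, if_neg h3]
      exact ihF d (i + 1)
    · rw [if_neg hg]

-- on a marker-free text both searches fail at once and B returns -1
theorem pvBLoop_nomark (cs : List Char)
    (hno : ¬ (['{', '{'] : List Char) <:+: cs) (hnc : ¬ (['}', '}'] : List Char) <:+: cs) :
    ∀ (F : Nat) (d i : Int), pvBLoop cs F d i = -1 := by
  intro F d i
  have ho := pvFindFrom_noInfix cs ['{', '{'] i (by simp) hno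
  have hc := pvFindFrom_noInfix cs ['}', '}'] i (by simp) hnc
  cases F with
  | zero => rfl
  | succ f =>
    rw [pvBLoop]
    simp [ho, hc]

-- ===== VERDICT (by name: the statement is the Claim_ definition above) =====
theorem find_matching_template_end_spec : Claim_equal_find_matching_template_end := by
  intro text start_index _hdom hpre
  unfold Spec_find_matching_template_end find_matching_template_end find_matching_template_end_alt PySem.Str.len
  rcases hpre with h0 | ⟨hno, hnc⟩
  · exact pvMain text.toList
      (((text.toList.length : Int) + 1 - start_index).toNat + ((text.toList.length : Int) + 1 - start_index).toNat)
      (((text.toList.length : Int) + 1 - start_index).toNat)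
      (((text.toList.length : Int) + 1 - start_index).toNat)
      start_index 0 le_rfl le_rfl le_rfl h0
  · have hno' : ¬ (['{', '{'] : List Char) <:+: text.toList := by
      rw [PySem.Str.isIn_eq] at hno
      exact (PySem.Chars.isIn_eq_false_iff _ _).mp hno
    have hnc' : ¬ (['}', '}'] : List Char) <:+: text.toList := by
      rw [PySem.Str.isIn_eq] at hnc
      exact (PySem.Chars.isIn_eq_false_iff _ _).mp hnc
    rw [pvALoop_nomark _ _ hno' hnc', pvBLoop_nomark _ hno' hnc']
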